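-- pv_equiv track=rewrite | github.com/RaghavVerma24/ccc | 2017/min-cost-flow.py | valid_and_cost
-- ===== SOURCE A (Python) =====
-- def valid_and_cost(arr):
--     unconnected_nodes = []
--     cost = 0
--     for (a, b, c) in arr:
--
--         cost += c
--
--         if a in unconnected_nodes:
--             unconnected_nodes.remove(a)
--         else:
--             unconnected_nodes.append(a)
--
--         if b in unconnected_nodes:
--             unconnected_nodes.remove(b)
--         else:
--             unconnected_nodes.append(b)
--
--     if len(unconnected_nodes) == 2:
--         return cost
--     else:
--         return -1
-- ===== SOURCE B (Python) =====
-- def valid_and_cost(arr):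
--     cost = 0
--     deg = {}
--     for (a, b, c) in arr:
--         cost += c
--         deg[a] = deg.get(a, 0) + 1
--         deg[b] = deg.get(b, 0) + 1
--     odd = sum(1 for v in deg.values() if v % 2 == 1)
--     return cost if odd == 2 else -1
-- ===== Notes on version B (the rewrite author's own statement) =====
-- stated objective: faster
-- what changed: B replaces A's live parity-membership list (linear 'in'/remove scans per edge) with a degree dictionary built in one pass, then counts odd-degree nodes in a separate scan.
import Mathlib
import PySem

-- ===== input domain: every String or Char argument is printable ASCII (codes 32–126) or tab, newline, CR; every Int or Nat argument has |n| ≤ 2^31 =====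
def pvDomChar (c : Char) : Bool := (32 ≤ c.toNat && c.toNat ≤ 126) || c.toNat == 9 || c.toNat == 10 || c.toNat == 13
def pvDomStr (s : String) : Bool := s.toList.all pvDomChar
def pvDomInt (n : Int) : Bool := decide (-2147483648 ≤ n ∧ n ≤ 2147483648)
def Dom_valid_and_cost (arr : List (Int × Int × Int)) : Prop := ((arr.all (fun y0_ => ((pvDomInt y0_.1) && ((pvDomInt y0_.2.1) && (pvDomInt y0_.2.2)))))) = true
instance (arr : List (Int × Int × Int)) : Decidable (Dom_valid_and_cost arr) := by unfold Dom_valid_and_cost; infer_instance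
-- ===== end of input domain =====

-- B replaces A's live parity-membership list (with its linear membership/remove scans per edge)
-- by a degree dictionary built in one pass plus a separate odd-degree count (O(n) instead of quadratic list scans).

-- ===== PORT A =====
-- one loop iteration of A: add the cost, toggle each endpoint in/out of unconnected_nodes
def pvStepA (p : List Int × Int) (e : Int × Int × Int) : List Int × Int :=
  let cost := p.2 + e.2.2
  let u1 := if e.1 ∈ p.1 then (PySem.List.remove? p.1 e.1).getD p.1 else p.1 ++ [e.1]
  let u2 := if e.2.1 ∈ u1 then (PySem.List.remove? u1 e.2.1).getD u1 else u1 ++ [e.2.1]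
  (u2, cost)

def valid_and_cost (arr : List (Int × Int × Int)) : Int :=
  let st := arr.foldl pvStepA ([], 0)
  if st.1.length = 2 then st.2 else -1

-- ===== PORT B =====
-- one loop iteration of B: add the cost, bump the degree of both endpoints (deg[x] = deg.get(x,0)+1)
def pvStepB (p : PySem.Dict Int Int × Int) (e : Int × Int × Int) : PySem.Dict Int Int × Int :=
  let cost := p.2 + e.2.2
  let d1 := p.1.insert e.1 (p.1.getD e.1 0 + 1)
  let d2 := d1.insert e.2.1 (d1.getD e.2.1 0 + 1)
  (d2, cost)

def valid_and_cost_alt (arr : List (Int × Int × Int)) : Int :=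
  let st := arr.foldl pvStepB (PySem.Dict.empty, 0)
  let odd := (st.1.values.filter (fun v => PySem.Int.mod v 2 == 1)).length
  if odd = 2 then st.2 else -1

-- ===== PRECONDITION & SPEC =====
def Spec_valid_and_cost (arr : List (Int × Int × Int)) (out : Int) : Prop := out = valid_and_cost_alt arr
instance (arr : List (Int × Int × Int)) (out : Int) : Decidable (Spec_valid_and_cost arr out) := by unfold Spec_valid_and_cost; infer_instance

-- ===== CLAIM (what is proved, stated in full; the proofs are below) =====
def Claim_equal_valid_and_cost : Prop := ∀ (arr : List (Int × Int × Int)), Dom_valid_and_cost arr → Spec_valid_and_cost arr (valid_and_cost arr)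

-- ===== LEMMAS AND PROOFS =====

-- toggling x in a duplicate-free list flips exactly x's membership and keeps the list duplicate-free
lemma pv_toggle (u : List Int) (x : Int) (hu : u.Nodup) :
    (if x ∈ u then (PySem.List.remove? u x).getD u else u ++ [x]).Nodup ∧
    ∀ v, v ∈ (if x ∈ u then (PySem.List.remove? u x).getD u else u ++ [x]) ↔
      (if v = x then v ∉ u else v ∈ u) := by
  by_cases hx : x ∈ u
  · rw [if_pos hx, PySem.List.remove?_eq_some_erase u x hx, Option.getD_some]
    refine ⟨hu.erase x, fun v => ?_⟩
    rw [hu.mem_erase_iff]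
    by_cases hv : v = x <;> simp [hv, hx]
  · rw [if_neg hx]
    refine ⟨by simp [List.nodup_append, hu]; exact fun a ha h => hx (h ▸ ha), fun v => ?_⟩
    by_cases hv : v = x <;> simp [hv, hx]

-- the loop invariant: A's list is duplicate-free and holds exactly the keys with odd count in B's dict,
-- and the accumulated costs agree
lemma pv_main (arr : List (Int × Int × Int)) :
    ∀ (u : List Int) (d : PySem.Dict Int Int) (cA cB : Int),
    u.Nodup → d.keys.Nodup →
    (∀ v, v ∈ u ↔ PySem.Int.mod (d.getD v 0) 2 = 1) → cA = cB →
    (arr.foldl pvStepA (u, cA)).1.Nodup ∧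
    (arr.foldl pvStepB (d, cB)).1.keys.Nodup ∧
    (∀ v, v ∈ (arr.foldl pvStepA (u, cA)).1 ↔
        PySem.Int.mod ((arr.foldl pvStepB (d, cB)).1.getD v 0) 2 = 1) ∧
    (arr.foldl pvStepA (u, cA)).2 = (arr.foldl pvStepB (d, cB)).2 := by
  induction arr with
  | nil => intro u d cA cB hu hk hm hc; exact ⟨hu, hk, hm, hc⟩
  | cons e rest ih =>
    intro u d cA cB hu hk hm hc
    simp only [List.foldl_cons]
    set a := e.1 with ha
    set b := e.2.1 with hb
    obtain ⟨h1n, h1m⟩ := pv_toggle u a hu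
    set u1 := if a ∈ u then (PySem.List.remove? u a).getD u else u ++ [a] with hu1
    obtain ⟨h2n, h2m⟩ := pv_toggle u1 b h1n
    have hstepA : pvStepA (u, cA) e =
        (if b ∈ u1 then (PySem.List.remove? u1 b).getD u1 else u1 ++ [b], cA + e.2.2) := rfl
    have hstepB : pvStepB (d, cB) e =
        ((d.insert a (d.getD a 0 + 1)).insert b
          ((d.insert a (d.getD a 0 + 1)).getD b 0 + 1), cB + e.2.2) := rfl
    rw [hstepA, hstepB]
    apply ih
    · exact h2n
    · exact PySem.Dict.nodup_keys_insert _ _ _ (PySem.Dict.nodup_keys_insert _ _ _ hk)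
    · intro v
      rw [h2m v]
      simp only [PySem.Dict.getD_insert]
      rw [h1m v]
      have e2 : (0:Int) < 2 := by norm_num
      have hv := hm v
      have hA := hm a
      rw [PySem.Int.mod_eq_emod_of_pos e2] at hv hA ⊢
      split_ifs with h1 h2 h3 h4 h5
      · subst h2; rw [not_not, hv]; omega
      · omega
      · omega
      · subst h1; rw [hv]; omega
      · subst h5; rw [hv]; omega
      · exact hv
    · omega
  
-- a duplicate-free list with the same membership as a filtered key list has the length of that filter
lemma pv_len (u : List Int) (d : PySem.Dict Int Int) (hu : u.Nodup) (hk : d.keys.Nodup)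
    (hm : ∀ v, v ∈ u ↔ PySem.Int.mod (d.getD v 0) 2 = 1) :
    u.length = (d.values.filter (fun v => PySem.Int.mod v 2 == 1)).length := by
  rw [PySem.Dict.values_eq_map_keys d hk 0, List.filter_map, List.length_map]
  apply List.Perm.length_eq
  rw [List.perm_ext_iff_of_nodup hu (hk.filter _)]
  intro v
  rw [List.mem_filter, hm v]
  constructor
  · intro h
    refine ⟨?_, by simpa using h⟩
    by_contra hnk
    have hc : d.contains v = false := by
      rw [PySem.Dict.contains_eq_decide_mem_keys]; simpa using hnk
    rw [PySem.Dict.getD_of_not_contains _ _ hc] at h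
    simp [PySem.Int.mod] at h
  · intro ⟨_, h⟩; simpa using h

-- ===== VERDICT (by name: the statement is the Claim_ definition above) =====
theorem valid_and_cost_spec : Claim_equal_valid_and_cost := by
  intro arr _
  unfold Spec_valid_and_cost valid_and_cost valid_and_cost_alt
  obtain ⟨hn, hkn, hmem, hcost⟩ :=
    pv_main arr [] PySem.Dict.empty 0 0 List.nodup_nil (by simp) (by simp [PySem.Int.mod]) rfl
  have hlen := pv_len _ _ hn hkn hmem
  simp only [hlen, hcost]
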